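/- GENERATED by tools/from_farm_form.py from farm/worked/two_to/Proof.lean (a worked proof of the farm's unit `two_to`,
   accepted by the verdict) — do not edit. -/
import ProgX.Base.Spec.Units.two_to

open X86 X86.User Asan ProgX.Base

set_option maxRecDepth 4000
set_option maxHeartbeats 4000000

/-- `two_to(n)` satisfies its contract: three register-only instructions (`add edi, 3FFH ; shl rdi, 52 ; movq xmm0, rdi`) and a
`ret`; no memory is written, so no shadow byte is. -/
theorem ProgX.Base.Spec.Proved.two_to_ok : ProgX.Base.Spec.two_to.Statement := by
  intro Lay hLay μ hμ u₀ hcode others frames u ret he hpre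
  v_entry he
  -- 0x101d00 … 0x101d0f (libm.c:18–20): straight-line, walked to the `ret`
  u_walk hcode [hμ.vendor] span [ProgX.Base.L.textLo, ProgX.Base.L.textHi] side (v_side)
  -- the state after the `ret`: the contract's `Returned`
  refine ReachVia.done ?_
  v_returned
  -- the post: no store at all, the memory is the entry's
  show ShadowUntouched u.mem s_101d0f.mem
  v_untouched
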